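-- pv_equiv track=rewrite | github.com/GreyRaphael/JobFinding | 0912CITICS02.py | solution
-- ===== SOURCE A (Python) =====
-- def solution(a,b):
--     col=int(a)
--     row=int(b)
--
--     matrix=[[]]
--     for i in range(col):
--         if i<col/2:
--             matrix[0].append(i+1)
--         else:
--             matrix[0].append(col-i)
--
--     for j in range(1, row):
--         if j<row/2:
--             matrix.append([j+1]*col)
--         else:
--             matrix.append([row-j]*col)
--
--
--     for i in range(1, row):
--         for j in range(1, col):
--             matrix[i][j]=matrix[i][j-1]+matrix[i-1][j]
--
--     matrix_sum=0
--     for k in range(row):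
--         matrix_sum+=sum(matrix[k])
--
--     return matrix_sum
-- ===== SOURCE B (Python) =====
-- def solution(a, b):
--     c, r = int(a), int(b)
--     if r <= 0 or c <= 0:
--         return 0
--     # Closed form: each boundary value spreads into the grid along lattice paths,
--     # so the total is a sum of boundary values times binomial path counts,
--     # collapsed by the hockey-stick identity.  No DP table is built.
--     total = 0
--     for j in range(c):                      # row 0 itself
--         total += min(j + 1, c - j)
--     binom = 1                               # C(r-1+m, m) for m = 0
--     for m in range(1, c):                   # top-boundary column k = c-m
--         binom = binom * (r - 1 + m) // m
--         k = c - m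
--         total += min(k + 1, c - k) * (binom - 1)
--     binom = 1                               # C(c-1+m, m) for m = 0
--     for m in range(1, r):                   # left-boundary row u = r-m
--         binom = binom * (c - 1 + m) // m
--         u = r - m
--         total += min(u + 1, r - u) * binom
--     return total
-- ===== Notes on version B (the rewrite author's own statement) =====
-- stated objective: faster
-- what changed: B builds no DP table at all: it evaluates the total in closed form as boundary values weighted by lattice-path binomial coefficients (collapsed with the hockey-stick identity), computing the binomials incrementally in two O(a)+O(b) loops.
import Mathlib
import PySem

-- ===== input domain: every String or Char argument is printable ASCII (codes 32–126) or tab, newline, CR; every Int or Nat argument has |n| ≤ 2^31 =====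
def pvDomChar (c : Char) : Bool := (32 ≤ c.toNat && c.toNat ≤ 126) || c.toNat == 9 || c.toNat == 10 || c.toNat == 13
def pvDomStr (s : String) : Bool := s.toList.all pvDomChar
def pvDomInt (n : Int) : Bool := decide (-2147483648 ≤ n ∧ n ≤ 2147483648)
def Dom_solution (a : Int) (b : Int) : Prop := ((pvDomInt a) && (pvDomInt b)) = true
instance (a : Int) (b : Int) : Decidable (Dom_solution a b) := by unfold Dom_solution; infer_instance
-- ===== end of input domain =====

-- B replaces A's O(a*b) DP grid by a closed form: each boundary value spreads into the grid along
-- lattice paths, so the total is a sum of boundary values times binomial coefficients, computed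
-- incrementally in two linear loops (hockey-stick identity); measured asymptotically faster.

-- ===== PORT A =====
-- Literal transliteration of A. 'i < col/2' (Python true division of ints) is exactly '2*i < col'
-- for integers, ported as such. '[x]*col' is List.replicate col.toNat x (Python clamps a negative
-- repeat count to 0, as toNat does). Append-only loops are ported as cons-accumulator folds with a
-- final reverse (same elements, same order). The DP loop 'matrix[i][j] = matrix[i][j-1] + matrix[i-1][j]'
-- walks rows 1..row-1 in order (dpWalk) and, inside a row, cells 1..col-1 in order (dpRow/dpGo),
-- reading exactly the just-written left neighbour and the finished previous row, as the Python does.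
-- The final pass sums matrix[k] for k in range(row); for row >= 1 the matrix has exactly row rows,
-- so it is a fold over the rows; for row <= 0 the loop body never runs (the guard below).

-- cells j = 1..: cur[j] := cur[j-1] + prev[j]  (first list: prev[1:], second: cur[1:])
def dpGo (last : Int) : List Int → List Int → List Int
  | p1 :: ps, _ :: cs => (last + p1) :: dpGo (last + p1) ps cs
  | _, cs => cs

-- one row of the DP loop (prev = matrix[i-1], cur = matrix[i]); cell 0 is never written
def dpRow (p cur : List Int) : List Int :=
  match cur, p with
  | c0 :: cs, _ :: ps => c0 :: dpGo c0 ps cs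
  | cur', _ => cur'

-- rows i = 1..row-1 in order, each reading the finished previous row
def dpWalk (prev : List Int) : List (List Int) → List (List Int)
  | [] => []
  | r :: rs => dpRow prev r :: dpWalk (dpRow prev r) rs

def solution (a : Int) (b : Int) : Int :=
  let col := a
  let row := b
  let row0 : List Int := ((PySem.List.pyRange 0 col 1).foldl
    (fun r i => if 2*i < col then (i+1) :: r else (col - i) :: r) []).reverse
  let rest : List (List Int) := ((PySem.List.pyRange 1 row 1).foldl
    (fun m j => if 2*j < row then List.replicate col.toNat (j+1) :: m
                else List.replicate col.toNat (row - j) :: m) []).reverse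
  let matrix2 : List (List Int) := row0 :: dpWalk row0 rest
  if row ≤ 0 then 0
  else matrix2.foldl (fun s r => s + r.sum) 0

-- ===== PORT B =====
-- Transliteration of Source B: the empty-grid guard, the row-0 sum, then two incremental-binomial
-- loops ('binom * (r-1+m) // m' is PySem.Int.floordiv, Python's floor division).
def solution_alt (a : Int) (b : Int) : Int :=
  let c := a
  let r := b
  if r ≤ 0 ∨ c ≤ 0 then 0
  else
    let total0 := (PySem.List.pyRange 0 c 1).foldl (fun s j => s + min (j + 1) (c - j)) 0
    let st1 := (PySem.List.pyRange 1 c 1).foldl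
      (fun (st : Int × Int) m =>
        let binom := PySem.Int.floordiv (st.1 * (r - 1 + m)) m
        let k := c - m
        (binom, st.2 + min (k + 1) (c - k) * (binom - 1))) (1, total0)
    let st2 := (PySem.List.pyRange 1 r 1).foldl
      (fun (st : Int × Int) m =>
        let binom := PySem.Int.floordiv (st.1 * (c - 1 + m)) m
        let u := r - m
        (binom, st.2 + min (u + 1) (r - u) * binom)) (1, st1.2)
    st2.2

-- ===== PRECONDITION & SPEC =====
def Spec_solution (a : Int) (b : Int) (out : Int) : Prop := out = solution_alt a b
instance (a : Int) (b : Int) (out : Int) : Decidable (Spec_solution a b out) := by unfold Spec_solution; infer_instance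

-- ===== CLAIM (what is proved, stated in full; the proofs are below) =====
def Claim_equal_solution : Prop := ∀ (a : Int) (b : Int), Dom_solution a b → Spec_solution a b (solution a b)

-- ===== LEMMAS AND PROOFS =====

-- boundary values: top row and left column of the grid
def tV (c : Int) (j : Nat) : Int := min ((j : Int) + 1) (c - (j : Int))
def lV (r : Int) (u : Nat) : Int := min ((u : Int) + 1) (r - (u : Int))

-- binomial coefficient as an Int
def chI (n k : Nat) : Int := (Nat.choose n k : Int)

-- the grid as a function: row 0 is the top boundary, row k+1 is l_(k+1) plus prefix sums of row k
def gV (c r : Int) : Nat → Nat → Int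
  | 0 => tV c
  | k+1 => fun j => lV r (k+1) + ∑ m ∈ Finset.Icc 1 j, gV c r k m

-- ---- A-side: the DP rows are canonical prefix-sum rows (as in the port's structure) ----

def canonRow (l : Int) (p : List Int) : List Int :=
  (List.range p.length).map (fun j => l + ((p.drop 1).take j).sum)

def topRow (col : Int) : List Int :=
  (PySem.List.pyRange 0 col 1).map (fun i => min (i+1) (col - i))

def canonSeq (col row : Int) : Nat → List Int
  | 0 => topRow col
  | k+1 => canonRow (min (((k:Int)+1)+1) (row - ((k:Int)+1))) (canonSeq col row k)

def pendF (col row : Int) (j : Int) : List Int :=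
  List.replicate col.toNat (if 2*j < row then j+1 else row - j)

-- prefix sums with a running offset (the shape of the DP's inner loop)
def pyAccumulate (s : Int) : List Int → List Int
  | [] => []
  | x :: xs => (s + x) :: pyAccumulate (s + x) xs

theorem length_canonRow (l : Int) (p : List Int) : (canonRow l p).length = p.length := by
  simp [canonRow]

theorem length_topRow (col : Int) : (topRow col).length = col.toNat := by
  simp [topRow, PySem.List.length_pyRange_one]

theorem length_canonSeq (col row : Int) (k : Nat) : (canonSeq col row k).length = col.toNat := by
  induction k with
  | zero => simp [canonSeq, length_topRow]
  | succ k ih => simp [canonSeq, length_canonRow, ih]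

theorem min_eq_ite (i c : Int) : (if 2*i < c then i+1 else c - i) = min (i+1) (c - i) := by
  rcases le_total (i+1) (c-i) with h | h <;> simp [h] <;> omega

theorem pyAccumulate_eq (p : List Int) (s : Int) :
    pyAccumulate s p = (List.range p.length).map (fun j => s + (p.take (j+1)).sum) := by
  induction p generalizing s with
  | nil => simp [pyAccumulate]
  | cons x xs ih =>
      simp only [pyAccumulate, ih, List.length_cons, List.range_succ_eq_map, List.map_cons,
        List.map_map, List.take_succ_cons, List.sum_cons, List.take_zero, List.sum_nil, add_zero]
      refine congrArg (_ :: ·) ?_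
      apply List.map_congr_left
      intro j _
      simp [Function.comp]
      ring

-- generic: a cons-accumulator fold reverses the mapped list
theorem pv_foldl_cons_map {α β : Type} (f : α → β) (l : List α) (acc : List β) :
    l.foldl (fun r x => f x :: r) acc = (l.map f).reverse ++ acc := by
  induction l generalizing acc with
  | nil => simp
  | cons x xs ih => simp [ih]

-- A's first boundary loop builds topRow
theorem row0_eq (col : Int) :
    ((PySem.List.pyRange 0 col 1).foldl
      (fun r i => if 2*i < col then (i+1) :: r else (col - i) :: r) []).reverse = topRow col := by
  rw [PySem.List.foldl_congr_mem _ _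
        (fun r i => (if 2*i < col then i+1 else col - i) :: r) _
        (by intro acc x _
            beta_reduce
            split_ifs <;> rfl)]
  rw [pv_foldl_cons_map]
  simp only [List.append_nil, List.reverse_reverse, topRow]
  exact List.map_congr_left (fun i _ => min_eq_ite i col)

-- A's second boundary loop builds the pending constant rows
theorem rest_eq (col row : Int) :
    ((PySem.List.pyRange 1 row 1).foldl
      (fun m j => if 2*j < row then List.replicate col.toNat (j+1) :: m
                  else List.replicate col.toNat (row - j) :: m) []).reverse
    = (PySem.List.pyRange 1 row 1).map (pendF col row) := by
  rw [PySem.List.foldl_congr_mem _ _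
        (fun m j => pendF col row j :: m) _
        (by intro acc x _
            beta_reduce
            unfold pendF
            split_ifs <;> rfl)]
  rw [pv_foldl_cons_map]
  simp

theorem dpGo_eq (ps : List Int) (cs : List Int) (last : Int) (h : cs.length = ps.length) :
    dpGo last ps cs = pyAccumulate last ps := by
  induction ps generalizing cs last with
  | nil =>
      have : cs = [] := List.length_eq_zero_iff.mp (by simpa using h)
      subst this; rfl
  | cons p1 ps ih =>
      cases cs with
      | nil => simp at h
      | cons c1 cs => simp [dpGo, pyAccumulate, ih _ _ (by simpa using h)]

-- A's inner DP loop on a constant row computes canonRow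
theorem dpRow_eq (col l : Int) (p : List Int) (hp : p.length = col.toNat) :
    dpRow p (List.replicate col.toNat l) = canonRow l p := by
  rcases hm : col.toNat with _ | m
  · have hp0 : p = [] := List.length_eq_zero_iff.mp (by omega)
    subst hp0
    simp [dpRow, canonRow]
  · cases p with
    | nil => simp [hm] at hp
    | cons p0 ps =>
        rw [List.replicate_succ]
        show l :: dpGo l ps (List.replicate m l) = canonRow l (p0 :: ps)
        have hlen : ps.length = m := by simpa [hm] using hp
        rw [dpGo_eq ps (List.replicate m l) l (by simp [hlen]), pyAccumulate_eq]
        simp only [canonRow, List.length_cons, List.drop_succ_cons, List.drop_zero, hlen,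
          List.range_succ_eq_map, List.map_cons, List.map_map]
        simp [Function.comp]

-- A's DP pass walks the pending rows into the canonical row sequence
theorem dpWalk_pend (col row : Int) (m : Nat) :
    ∀ (n : Nat), (1 + (n:Int)) + (m:Int) = row →
    dpWalk (canonSeq col row n) ((PySem.List.pyRange (1 + (n:Int)) row 1).map (pendF col row))
      = (List.range m).map (fun t => canonSeq col row (n+1+t)) := by
  induction m with
  | zero =>
      intro n hn
      rw [PySem.List.pyRange_one_eq_nil (by omega)]
      simp [dpWalk]
  | succ m ih =>
      intro n hn
      rw [PySem.List.pyRange_one_cons (by omega)]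
      simp only [List.map_cons, dpWalk]
      have hrow : dpRow (canonSeq col row n) (pendF col row (1 + (n:Int)))
          = canonSeq col row (n+1) := by
        unfold pendF
        rw [dpRow_eq col _ (canonSeq col row n) (length_canonSeq col row n)]
        rw [min_eq_ite]
        show canonRow _ _ = canonRow _ _
        congr 2 <;> omega
      rw [hrow]
      have ih' := ih (n+1) (by push_cast; push_cast at hn; omega)
      rw [show (1 + (n:Int)) + 1 = 1 + ((n+1:Nat):Int) by push_cast; ring]
      rw [ih']
      rw [List.range_succ_eq_map, List.map_cons, List.map_map]
      simp only [Nat.add_zero]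
      refine congrArg (_ :: ·) ?_
      apply List.map_congr_left
      intro t _
      simp [Function.comp]
      congr 1
      omega

-- A computes the sum of the canonical rows
theorem solution_eq_canon (a b : Int) (hb : 1 ≤ b) :
    solution a b = ((List.range b.toNat).map (fun k => (canonSeq a b k).sum)).sum := by
  simp only [solution, if_neg (show ¬ b ≤ 0 by omega)]
  rw [row0_eq, rest_eq]
  have h0 : topRow a = canonSeq a b 0 := rfl
  rw [h0]
  have hw := dpWalk_pend a b (b-1).toNat 0 (by push_cast; omega)
  rw [show (1 + ((0:Nat):Int)) = 1 by norm_num] at hw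
  rw [hw]
  rw [PySem.List.foldl_add _ List.sum 0]
  rw [show b.toNat = (b-1).toNat + 1 by omega, List.range_succ_eq_map]
  simp only [List.map_cons, List.map_map, List.sum_cons, zero_add]
  refine congrArg (_ + ·) ?_
  refine congrArg List.sum ?_
  apply List.map_congr_left
  intro t _
  simp only [Function.comp_apply]
  congr 2
  omega

-- ---- bridge: canonical rows are the rows of gV ----

theorem sum_map_range (f : Nat → Int) (n : Nat) :
    ((List.range n).map f).sum = ∑ j ∈ Finset.range n, f j := by
  induction n with
  | zero => simp
  | succ n ih => rw [List.range_succ, Finset.sum_range_succ]; simp [ih]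

theorem dropTakeSum (f : Nat → Int) (n j : Nat) (h : j < n) :
    ((((List.range n).map f).drop 1).take j).sum = ∑ m ∈ Finset.Icc 1 j, f m := by
  induction j with
  | zero => simp
  | succ j ih =>
      rw [List.take_succ, List.sum_append, ih (by omega)]
      rw [Finset.sum_Icc_succ_top (by omega)]
      have : ((((List.range n).map f).drop 1))[j]? = some (f (1+j)) := by
        rw [List.getElem?_drop, List.getElem?_map, List.getElem?_range (by omega)]
        rfl
      rw [this]
      simp [add_comm 1 j]

theorem canonSeq_eq_gV (a b : Int) (k : Nat) :
    canonSeq a b k = (List.range a.toNat).map (gV a b k) := by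
  induction k with
  | zero =>
      show topRow a = _
      rw [topRow, PySem.List.pyRange_one]
      simp only [sub_zero, List.map_map]
      apply List.map_congr_left
      intro j _
      simp [Function.comp, gV, tV]
  | succ k ih =>
      show canonRow _ (canonSeq a b k) = _
      rw [canonRow, length_canonSeq, ih]
      apply List.map_congr_left
      intro j hj
      rw [List.mem_range] at hj
      rw [dropTakeSum _ _ _ hj]
      show _ = gV a b (k+1) j
      simp only [gV, lV]
      push_cast
      ring_nf

theorem canonSum_eq (a b : Int) (k : Nat) :
    (canonSeq a b k).sum = ∑ j ∈ Finset.range a.toNat, gV a b k j := by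
  rw [canonSeq_eq_gV, sum_map_range]

theorem solution_eq_grid (a b : Int) (hb : 1 ≤ b) :
    solution a b = ∑ i ∈ Finset.range b.toNat, ∑ j ∈ Finset.range a.toNat, gV a b i j := by
  rw [solution_eq_canon a b hb, sum_map_range]
  exact Finset.sum_congr rfl (fun i _ => canonSum_eq a b i)

-- ---- hockey-stick identities ----

theorem hs1 (m D : Nat) :
    ∑ d ∈ Finset.range (D+1), chI (m+d) d = chI (m+D+1) D := by
  unfold chI
  rw [← Nat.cast_sum]
  have h1 : ∀ d, (m+d).choose d = (d+m).choose m := fun d => by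
    rw [Nat.choose_symm_of_eq_add (show m+d = d+m by omega), Nat.add_comm m d]
  rw [Finset.sum_congr rfl (fun d _ => by rw [h1 d])]
  rw [Nat.sum_range_add_choose D m]
  congr 1
  rw [show D+m+1 = m+D+1 by omega]
  exact Nat.choose_symm_of_eq_add (by omega)

theorem hs2 (S D : Nat) :
    ∑ s ∈ Finset.range S, ∑ d ∈ Finset.range D, chI (s+d) d = chI (S+D) S - 1 := by
  induction S with
  | zero => simp [chI]
  | succ S ih =>
      rw [Finset.sum_range_succ, ih]
      cases D with
      | zero => simp [chI]
      | succ D =>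
          rw [hs1 S D]
          have hp : (S+(D+1)).choose S + (S+(D+1)).choose (S+1) = (S+1+(D+1)).choose (S+1) := by
            rw [show S+1+(D+1) = (S+(D+1))+1 by omega]
            exact (Nat.choose_succ_succ (S+(D+1)) S).symm
          have hsym : (S+D+1).choose D = (S+(D+1)).choose (S+1) := by
            rw [show S+D+1 = S+(D+1) by omega]
            exact (Nat.choose_symm_of_eq_add (by omega)).symm
          unfold chI
          rw [hsym]
          push_cast [← hp]
          ring

-- triangular double-sum swap, range form
theorem tri_swap (n : Nat) (F : Nat → Nat → Int) :
    ∑ j ∈ Finset.range n, ∑ k ∈ Finset.range (j+1), F k j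
      = ∑ k ∈ Finset.range n, ∑ d ∈ Finset.range (n-k), F k (k+d) := by
  have h := Finset.sum_Ico_Ico_comm 0 n F
  simp only [← Finset.range_eq_Ico] at h
  rw [← h]
  exact Finset.sum_congr rfl (fun k _ => by rw [Finset.sum_Ico_eq_sum_range])

-- ---- closed form for a grid cell ----

theorem icc_shift (f : Nat → Int) (j : Nat) :
    ∑ m ∈ Finset.Icc 1 j, f m = ∑ m ∈ Finset.range j, f (m+1) := by
  rw [← Finset.Ico_add_one_right_eq_Icc, Finset.sum_Ico_eq_sum_range]
  simp [add_comm 1]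

theorem gV_closed (c r : Int) (i j : Nat) :
    gV c r (i+1) (j+1)
      = (∑ k ∈ Finset.range (j+1), tV c (k+1) * chI (i + (j-k)) (j-k))
      + (∑ u ∈ Finset.range (i+1), lV r (u+1) * chI ((i-u) + j) j) := by
  induction i generalizing j with
  | zero =>
      show lV r 1 + ∑ m ∈ Finset.Icc 1 (j+1), gV c r 0 m = _
      rw [icc_shift]
      have h1 : ∀ k ∈ Finset.range (j+1),
          tV c (k+1) * chI (0 + (j-k)) (j-k) = tV c (k+1) := by
        intro k _
        simp [chI, Nat.choose_self]
      rw [Finset.sum_congr rfl h1]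
      simp only [gV, Finset.sum_range_one, Nat.zero_sub, Nat.zero_add]
      simp [chI, Nat.choose_self]
      ring
  | succ i ih =>
      show lV r (i+2) + ∑ m ∈ Finset.Icc 1 (j+1), gV c r (i+1) m = _
      rw [icc_shift]
      rw [Finset.sum_congr rfl (fun m _ => ih m)]
      rw [Finset.sum_add_distrib]
      -- top part: triangular swap then hockey stick
      have htop : ∑ m ∈ Finset.range (j+1), ∑ k ∈ Finset.range (m+1),
            tV c (k+1) * chI (i + (m-k)) (m-k)
          = ∑ k ∈ Finset.range (j+1), tV c (k+1) * chI ((i+1) + (j-k)) (j-k) := by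
        rw [Finset.range_eq_Ico, ← Finset.sum_Ico_Ico_comm 0 (j+1)
          (fun k m => tV c (k+1) * chI (i + (m-k)) (m-k))]
        apply Finset.sum_congr rfl
        intro k hk
        rw [Finset.mem_Ico] at hk
        rw [Finset.sum_Ico_eq_sum_range]
        have hjk : j + 1 - k = (j - k) + 1 := by omega
        rw [hjk, ← Finset.mul_sum]
        congr 1
        rw [Finset.sum_congr rfl (fun d _ => by
          rw [show k + d - k = d from by omega])]
        rw [hs1 i (j-k)]
        congr 1
        omega
      -- left part: independent swap then hockey stick
      have hleft : ∑ m ∈ Finset.range (j+1), ∑ u ∈ Finset.range (i+1),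
            lV r (u+1) * chI ((i-u) + m) m
          = ∑ u ∈ Finset.range (i+1), lV r (u+1) * chI ((i+1-u) + j) j := by
        rw [Finset.sum_comm]
        apply Finset.sum_congr rfl
        intro u hu
        rw [Finset.mem_range] at hu
        rw [← Finset.mul_sum, hs1 (i-u) j]
        congr 2
        omega
      rw [htop, hleft]
      rw [show Finset.range (i+1+1) = Finset.range (i+2) from rfl]
      rw [Finset.sum_range_succ (fun u => lV r (u+1) * chI ((i+1-u) + j) j) (i+1)]
      simp only [Nat.sub_self, Nat.zero_add, chI, Nat.choose_self]
      push_cast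
      ring

-- ---- closed form for the total ----

theorem grid_closed (c r : Int) (R' C' : Nat) :
    ∑ i ∈ Finset.range (R'+1), ∑ j ∈ Finset.range (C'+1), gV c r i j
      = (∑ j ∈ Finset.range (C'+1), tV c j)
      + (∑ k ∈ Finset.range C', tV c (k+1) * (chI (R' + (C'-k)) R' - 1))
      + (∑ u ∈ Finset.range R', lV r (u+1) * chI ((R'-u) + C') (R'-u)) := by
  rw [Finset.sum_range_succ' (fun i => ∑ j ∈ Finset.range (C'+1), gV c r i j) R']
  have hrow0 : ∑ j ∈ Finset.range (C'+1), gV c r 0 j = ∑ j ∈ Finset.range (C'+1), tV c j := by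
    simp [gV]
  rw [hrow0]
  -- expand each interior row with the cell closed form and swap the top triangle
  have hrow : ∀ i', ∑ j ∈ Finset.range (C'+1), gV c r (i'+1) j
      = lV r (i'+1)
        + (∑ k ∈ Finset.range C', tV c (k+1) * ∑ d ∈ Finset.range (C'-k), chI (i'+d) d)
        + (∑ u ∈ Finset.range (i'+1), lV r (u+1)
            * ∑ j' ∈ Finset.range C', chI ((i'-u) + j') j') := by
    intro i'
    rw [Finset.sum_range_succ' (fun j => gV c r (i'+1) j) C']
    have h0 : gV c r (i'+1) 0 = lV r (i'+1) := by
      show lV r (i'+1) + ∑ m ∈ Finset.Icc 1 0, gV c r i' m = _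
      simp
    rw [h0, Finset.sum_congr rfl (fun j' _ => gV_closed c r i' j'), Finset.sum_add_distrib]
    have htop : ∑ j' ∈ Finset.range C', ∑ k ∈ Finset.range (j'+1),
          tV c (k+1) * chI (i' + (j'-k)) (j'-k)
        = ∑ k ∈ Finset.range C', tV c (k+1) * ∑ d ∈ Finset.range (C'-k), chI (i'+d) d := by
      rw [tri_swap C' (fun k j' => tV c (k+1) * chI (i' + (j'-k)) (j'-k))]
      apply Finset.sum_congr rfl
      intro k _
      rw [← Finset.mul_sum]
      congr 1
      apply Finset.sum_congr rfl
      intro d _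
      rw [show k + d - k = d from by omega]
    have hleft : ∑ j' ∈ Finset.range C', ∑ u ∈ Finset.range (i'+1),
          lV r (u+1) * chI ((i'-u) + j') j'
        = ∑ u ∈ Finset.range (i'+1), lV r (u+1)
            * ∑ j' ∈ Finset.range C', chI ((i'-u) + j') j' := by
      rw [Finset.sum_comm]
      exact Finset.sum_congr rfl (fun u _ => (Finset.mul_sum _ _ _).symm)
    rw [htop, hleft]
    ring
  rw [Finset.sum_congr rfl (fun i' (_ : i' ∈ Finset.range R') => hrow i'),
      Finset.sum_add_distrib, Finset.sum_add_distrib]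
  -- collapse the top part with the double hockey stick
  have htot : ∑ i' ∈ Finset.range R', ∑ k ∈ Finset.range C',
        tV c (k+1) * ∑ d ∈ Finset.range (C'-k), chI (i'+d) d
      = ∑ k ∈ Finset.range C', tV c (k+1) * (chI (R' + (C'-k)) R' - 1) := by
    rw [Finset.sum_comm]
    apply Finset.sum_congr rfl
    intro k _
    rw [← Finset.mul_sum, hs2 R' (C'-k)]
  -- collapse the left part: triangular swap then double hockey stick
  have hltot : ∑ i' ∈ Finset.range R', ∑ u ∈ Finset.range (i'+1),
        lV r (u+1) * ∑ j' ∈ Finset.range C', chI ((i'-u) + j') j'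
      = ∑ u ∈ Finset.range R', lV r (u+1) * (chI ((R'-u) + C') (R'-u) - 1) := by
    rw [tri_swap R'
      (fun u i' => lV r (u+1) * ∑ j' ∈ Finset.range C', chI ((i'-u) + j') j')]
    apply Finset.sum_congr rfl
    intro u _
    rw [← Finset.mul_sum]
    congr 1
    rw [Finset.sum_congr rfl (fun s (_ : s ∈ Finset.range (R'-u)) =>
      Finset.sum_congr rfl (fun j' _ => by rw [show u + s - u = s from by omega]))]
    exact hs2 (R'-u) C'
  rw [htot, hltot]
  -- merge the column-0 terms into the left sum
  have hmerge : ∑ i' ∈ Finset.range R', lV r (i'+1)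
        + ∑ u ∈ Finset.range R', lV r (u+1) * (chI ((R'-u) + C') (R'-u) - 1)
      = ∑ u ∈ Finset.range R', lV r (u+1) * chI ((R'-u) + C') (R'-u) := by
    rw [← Finset.sum_add_distrib]
    exact Finset.sum_congr rfl (fun u _ => by ring)
  linarith [hmerge]

theorem chI_symm (n k l : Nat) (h : n = k + l) : chI n k = chI n l := by
  unfold chI
  exact_mod_cast Nat.choose_symm_of_eq_add h

-- reflected, matching B's loop order (m runs over columns/rows from the far end)
theorem grid_closed' (c r : Int) (R' C' : Nat) (hc : (C' : Int) = c - 1) (hr : (R' : Int) = r - 1) :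
    ∑ i ∈ Finset.range (R'+1), ∑ j ∈ Finset.range (C'+1), gV c r i j
      = (∑ j ∈ Finset.range (C'+1), tV c j)
      + (∑ m ∈ Finset.range C', min (c - m) ((m:Int)+1) * (chI (R'+m+1) (m+1) - 1))
      + (∑ m ∈ Finset.range R', min (r - m) ((m:Int)+1) * chI (C'+m+1) (m+1)) := by
  rw [grid_closed c r R' C']
  congr 1
  · congr 1
    rw [← Finset.sum_range_reflect (fun k => tV c (k+1) * (chI (R' + (C'-k)) R' - 1)) C']
    apply Finset.sum_congr rfl
    intro m hm
    rw [Finset.mem_range] at hm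
    have h1 : C' - 1 - m + 1 = C' - m := by omega
    have h2 : C' - (C' - 1 - m) = m + 1 := by omega
    rw [h1, h2]
    have h3 : tV c (C' - m) = min (c - m) ((m:Int)+1) := by
      unfold tV
      have : ((C' - m : Nat) : Int) = c - 1 - m := by omega
      rw [this]
      congr 1 <;> ring
    rw [h3, chI_symm (R' + (m+1)) R' (m+1) (by omega),
        show R' + (m+1) = R' + m + 1 from by omega]
  · rw [← Finset.sum_range_reflect (fun u => lV r (u+1) * chI ((R'-u) + C') (R'-u)) R']
    apply Finset.sum_congr rfl
    intro m hm
    rw [Finset.mem_range] at hm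
    have h1 : R' - 1 - m + 1 = R' - m := by omega
    have h2 : R' - (R' - 1 - m) = m + 1 := by omega
    rw [h1, h2]
    have h3 : lV r (R' - m) = min (r - m) ((m:Int)+1) := by
      unfold lV
      have : ((R' - m : Nat) : Int) = r - 1 - m := by omega
      rw [this]
      congr 1 <;> ring
    rw [h3, show m + 1 + C' = C' + m + 1 from by omega]

-- ---- B-side: the loops compute the closed form ----

-- generic incremental-binomial loop: after n steps the state is (C(q+n,n), T0 + the partial sum)
theorem binom_loop (q : Nat) (G : Int → Int → Int) (T0 : Int) (n : Nat) :
    (PySem.List.pyRange 1 (1+(n:Int)) 1).foldl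
      (fun (st : Int × Int) m =>
        (PySem.Int.floordiv (st.1 * ((q:Int) + m)) m,
         st.2 + G m (PySem.Int.floordiv (st.1 * ((q:Int) + m)) m))) (1, T0)
    = (chI (q+n) n, T0 + ∑ m ∈ Finset.range n, G ((m:Int)+1) (chI (q+m+1) (m+1))) := by
  induction n with
  | zero =>
      rw [show ((0:Nat):Int) = 0 from rfl, PySem.List.pyRange_one_eq_nil (by norm_num)]
      simp [chI]
  | succ n ih =>
      rw [show (1 + ((n+1:Nat):Int)) = (1 + (n:Int)) + 1 from by push_cast; ring,
          PySem.List.pyRange_one_succ_right (by omega), List.foldl_append, ih]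
      simp only [List.foldl_cons, List.foldl_nil]
      have hnat : (q+n).choose n * (q+n+1) = (q+n+1).choose (n+1) * (n+1) := by
        rw [Nat.mul_comm]
        exact Nat.succ_mul_choose_eq (q+n) n
      have hb : PySem.Int.floordiv (chI (q+n) n * ((q:Int) + (1+(n:Int)))) (1+(n:Int))
          = chI (q+n+1) (n+1) := by
        unfold chI
        rw [show ((q:Int) + (1+(n:Int))) = ((q+n+1 : Nat) : Int) from by push_cast; ring,
            show (1+(n:Int)) = ((n+1 : Nat) : Int) from by push_cast; ring,
            ← Nat.cast_mul, PySem.Int.floordiv_natCast]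
        rw [hnat, Nat.mul_div_cancel _ (by omega)]
      rw [hb, Finset.sum_range_succ]
      rw [show (1+(n:Int)) = (n:Int)+1 from by ring]
      simp [add_assoc]

theorem foldl_add_eq_sum (l : List Int) (f : Int → Int) (s : Int) :
    l.foldl (fun acc x => acc + f x) s = s + (l.map f).sum := by
  induction l generalizing s with
  | nil => simp
  | cons x xs ih => simp [ih]; ring

theorem sum_loop (c : Int) :
    (PySem.List.pyRange 0 c 1).foldl (fun s j => s + min (j + 1) (c - j)) 0
      = ∑ j ∈ Finset.range c.toNat, tV c j := by
  have h := foldl_add_eq_sum (PySem.List.pyRange 0 c 1) (fun j => min (j + 1) (c - j)) 0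
  simp only [] at h
  rw [h, PySem.List.pyRange_one, List.map_map, sub_zero, sum_map_range]
  rw [Finset.sum_congr rfl (fun j (_ : j ∈ Finset.range c.toNat) =>
    show ((fun j => min (j + 1) (c - j)) ∘ fun k : Nat => 0 + (k:Int)) j = tV c j from by
      simp [Function.comp, tV])]
  ring

theorem binom_loop_snd (q : Nat) (G : Int → Int → Int) (T0 : Int) (n : Nat) :
    ((PySem.List.pyRange 1 (1+(n:Int)) 1).foldl
      (fun (st : Int × Int) m =>
        (PySem.Int.floordiv (st.1 * ((q:Int) + m)) m,
         st.2 + G m (PySem.Int.floordiv (st.1 * ((q:Int) + m)) m))) (1, T0)).2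
    = T0 + ∑ m ∈ Finset.range n, G ((m:Int)+1) (chI (q+m+1) (m+1)) := by
  rw [binom_loop q G T0 n]

theorem solution_alt_closed (a b : Int) (ha : 1 ≤ a) (hb : 1 ≤ b) :
    solution_alt a b
      = (∑ j ∈ Finset.range ((a-1).toNat+1), tV a j)
      + (∑ m ∈ Finset.range (a-1).toNat,
          min (a - m) ((m:Int)+1) * (chI ((b-1).toNat+m+1) (m+1) - 1))
      + (∑ m ∈ Finset.range (b-1).toNat,
          min (b - m) ((m:Int)+1) * chI ((a-1).toNat+m+1) (m+1)) := by
  simp only [solution_alt, if_neg (show ¬ (b ≤ 0 ∨ a ≤ 0) from by omega)]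
  rw [sum_loop a]
  rw [show PySem.List.pyRange 1 a 1 = PySem.List.pyRange 1 (1 + (((a-1).toNat):Int)) 1 from by
        congr 1; omega,
      show PySem.List.pyRange 1 b 1 = PySem.List.pyRange 1 (1 + (((b-1).toNat):Int)) 1 from by
        congr 1; omega]
  have hf2 : (fun (st : Int × Int) (m : Int) =>
        (PySem.Int.floordiv (st.1 * (b - 1 + m)) m,
         st.2 + min (a - m + 1) (a - (a - m))
           * (PySem.Int.floordiv (st.1 * (b - 1 + m)) m - 1)))
      = (fun (st : Int × Int) (m : Int) =>
        (PySem.Int.floordiv (st.1 * ((((b-1).toNat):Int) + m)) m,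
         st.2 + min (a - m + 1) (a - (a - m))
           * (PySem.Int.floordiv (st.1 * ((((b-1).toNat):Int) + m)) m - 1))) := by
    funext st m
    rw [show (((b-1).toNat):Int) = b - 1 from by omega]
  have hf3 : (fun (st : Int × Int) (m : Int) =>
        (PySem.Int.floordiv (st.1 * (a - 1 + m)) m,
         st.2 + min (b - m + 1) (b - (b - m))
           * PySem.Int.floordiv (st.1 * (a - 1 + m)) m))
      = (fun (st : Int × Int) (m : Int) =>
        (PySem.Int.floordiv (st.1 * ((((a-1).toNat):Int) + m)) m,
         st.2 + min (b - m + 1) (b - (b - m))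
           * PySem.Int.floordiv (st.1 * ((((a-1).toNat):Int) + m)) m)) := by
    funext st m
    rw [show (((a-1).toNat):Int) = a - 1 from by omega]
  rw [hf2, hf3]
  have h2 := binom_loop_snd ((b-1).toNat)
    (fun m bi => min (a - m + 1) (a - (a - m)) * (bi - 1))
    (∑ j ∈ Finset.range a.toNat, tV a j) ((a-1).toNat)
  simp only [] at h2
  rw [h2]
  have h3 := binom_loop_snd ((a-1).toNat)
    (fun m bi => min (b - m + 1) (b - (b - m)) * bi)
    ((∑ j ∈ Finset.range a.toNat, tV a j)
      + ∑ m ∈ Finset.range (a-1).toNat,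
          min (a - ((m:Int)+1) + 1) (a - (a - ((m:Int)+1)))
            * (chI ((b-1).toNat+m+1) (m+1) - 1)) ((b-1).toNat)
  simp only [] at h3
  rw [h3]
  rw [show a.toNat = (a-1).toNat + 1 from by omega]
  congr 1
  · congr 1
    apply Finset.sum_congr rfl
    intro m _
    rw [show a - ((m:Int)+1) + 1 = a - m from by ring,
        show a - (a - ((m:Int)+1)) = (m:Int)+1 from by ring]
  · apply Finset.sum_congr rfl
    intro m _
    rw [show b - ((m:Int)+1) + 1 = b - m from by ring,
        show b - (b - ((m:Int)+1)) = (m:Int)+1 from by ring]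

-- ===== VERDICT (by name: the statement is the Claim_ definition above) =====
theorem solution_spec : Claim_equal_solution := by
  intro a b _
  unfold Spec_solution
  by_cases hb : b ≤ 0
  · simp [solution, solution_alt, hb]
  · by_cases ha : a ≤ 0
    · rw [solution_eq_grid a b (by omega)]
      have hz : a.toNat = 0 := by omega
      simp [solution_alt, ha, hz]
    · rw [solution_eq_grid a b (by omega), solution_alt_closed a b (by omega) (by omega)]
      rw [show b.toNat = (b-1).toNat + 1 by omega, show a.toNat = (a-1).toNat + 1 by omega]
      rw [grid_closed' a b (b-1).toNat (a-1).toNat (by omega) (by omega)]
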